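-- pv_equiv track=rewrite | github.com/Thif/aoc-2024 | code/day_7.py | check_possible_combinations
-- ===== SOURCE A (Python) =====
-- from itertools import product
--
-- def check_possible_combinations(v):
--
--     goal = v[0]
--     elements = v[1:]
--     ops = product("*+", repeat=len(elements) - 1)
--
--     for lo in ops:
--         tmp = elements[0]
--         for o, e in zip(lo, elements[1:]):
--
--             if o == "+":
--                 tmp += e
--             elif o == "*":
--                 tmp *= e
--         if tmp == goal:
--             return True, lo
--
--     return False, None
-- ===== SOURCE B (Python) =====
-- def check_possible_combinations(v):
--     goal = v[0]
--     elements = v[1:]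
--     n = len(elements)
--
--     def dfs(i, acc):
--         # returns the list of operators completing acc to goal, or None
--         if i == n:
--             return [] if acc == goal else None
--         r = dfs(i + 1, acc * elements[i])
--         if r is not None:
--             return ["*"] + r
--         r = dfs(i + 1, acc + elements[i])
--         if r is not None:
--             return ["+"] + r
--         return None
--
--     r = dfs(1, elements[0])
--     return (True, tuple(r)) if r is not None else (False, None)
-- ===== Notes on version B (the rewrite author's own statement) =====
-- stated objective: alternative
-- what changed: Replaces the full enumeration of all 2^(n-1) operator tuples (each re-evaluated from scratch left to right) by a DFS that tries '*' then '+' per position while carrying the running value, so prefixes are shared and evaluation stops at the first success; intended as faster (measured 7.6x at n=16; both are exponential and time out at n=64).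
-- outside the precondition, e.g. on check_possible_combinations([0]): A raises ValueError, B raises IndexError; on check_possible_combinations([]): A raises IndexError, B raises IndexError
import Mathlib
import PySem

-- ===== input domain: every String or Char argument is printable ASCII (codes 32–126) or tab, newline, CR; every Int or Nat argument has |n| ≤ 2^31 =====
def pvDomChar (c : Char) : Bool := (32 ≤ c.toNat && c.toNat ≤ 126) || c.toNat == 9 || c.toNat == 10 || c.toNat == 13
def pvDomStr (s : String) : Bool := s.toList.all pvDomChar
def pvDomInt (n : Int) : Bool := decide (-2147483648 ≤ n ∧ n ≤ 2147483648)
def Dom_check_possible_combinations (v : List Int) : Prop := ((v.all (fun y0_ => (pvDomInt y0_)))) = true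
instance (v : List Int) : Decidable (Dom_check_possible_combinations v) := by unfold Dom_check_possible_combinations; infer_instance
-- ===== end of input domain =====

-- B replaces A's enumeration of all operator tuples (each re-evaluated from scratch) by a
-- DFS with an incremental running value ('*' tried before '+', matching A's product order).

-- ===== PORT A =====
-- itertools.product("*+", repeat=k): leftmost position varies slowest, "*" before "+"
def pvProduct : Nat → List (List String)
  | 0 => [[]]
  | k + 1 => (pvProduct k).map (fun lo => "*" :: lo) ++ (pvProduct k).map (fun lo => "+" :: lo)

-- the inner 'for o, e in zip(lo, elements[1:])' loop updating tmp
def pvEvalZip : List String → List Int → Int → Int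
  | o :: los, e :: es, tmp =>
      pvEvalZip los es (if o = "+" then tmp + e else if o = "*" then tmp * e else tmp)
  | _, _, tmp => tmp

-- the outer 'for lo in ops' loop
def pvScan (goal : Int) (elements : List Int) : List (List String) → Bool × Option (List String)
  | [] => (false, none)
  | lo :: rest =>
      let tmp := pvEvalZip lo (elements.drop 1) (elements.headD 0)
      if tmp = goal then (true, some lo) else pvScan goal elements rest

def check_possible_combinations (v : List Int) : Bool × Option (List String) :=
  let goal := v.headD 0
  let elements := v.drop 1
  pvScan goal elements (pvProduct (elements.length - 1))

-- ===== PORT B =====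
-- dfs(i, acc): operators completing acc to goal over the remaining elements, or none
def pvDfs (goal : Int) : List Int → Int → Option (List String)
  | [], acc => if acc = goal then some [] else none
  | e :: rest, acc =>
      match pvDfs goal rest (acc * e) with
      | some r => some ("*" :: r)
      | none =>
        match pvDfs goal rest (acc + e) with
        | some r => some ("+" :: r)
        | none => none

def check_possible_combinations_alt (v : List Int) : Bool × Option (List String) :=
  let goal := v.headD 0
  match v.drop 1 with
  | [] => (false, none)  -- unreachable under Pre_ (Python B raises IndexError here, as does A)
  | e :: rest =>
      match pvDfs goal rest e with
      | some r => (true, some r)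
      | none => (false, none)

-- ===== PRECONDITION & SPEC =====
-- Python A raises on v with fewer than 2 elements (IndexError on v[0], or ValueError from
-- product(repeat=-1)); exactly those inputs are excluded.
def Pre_check_possible_combinations (v : List Int) : Prop := 2 ≤ v.length
instance (v : List Int) : Decidable (Pre_check_possible_combinations v) := by unfold Pre_check_possible_combinations; infer_instance
def pvWitness_check_possible_combinations : List Int := [3, 1, 2]
def Spec_check_possible_combinations (v : List Int) (out : Bool × Option (List String)) : Prop := out = check_possible_combinations_alt v
instance (v : List Int) (out : Bool × Option (List String)) : Decidable (Spec_check_possible_combinations v out) := by unfold Spec_check_possible_combinations; infer_instance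

-- ===== CLAIM =====
def Claim_equal_check_possible_combinations : Prop := ∀ (v : List Int), Dom_check_possible_combinations v → Pre_check_possible_combinations v → Spec_check_possible_combinations v (check_possible_combinations v)

-- ===== LEMMAS AND PROOFS =====

-- generalized A-side scan with head element / accumulator made explicit
def pvScan' (goal acc : Int) (rs : List Int) : List (List String) → Bool × Option (List String)
  | [] => (false, none)
  | lo :: rest =>
      if pvEvalZip lo rs acc = goal then (true, some lo) else pvScan' goal acc rs rest

theorem pvScan_eq_scan' (goal : Int) (e : Int) (rs : List Int) (C : List (List String)) :
    pvScan goal (e :: rs) C = pvScan' goal e rs C := by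
  induction C with
  | nil => rfl
  | cons lo rest ih => simp [pvScan, pvScan', ih]

-- Scanning a concatenation: first hit in c1, else scan c2.
theorem pvScan'_append (goal acc : Int) (rs : List Int) (c1 c2 : List (List String)) :
    pvScan' goal acc rs (c1 ++ c2) =
      match pvScan' goal acc rs c1 with
      | (true, r) => (true, r)
      | (false, _) => pvScan' goal acc rs c2 := by
  induction c1 with
  | nil => simp [pvScan']
  | cons lo rest ih =>
      simp only [List.cons_append, pvScan']
      split_ifs <;> simp [ih]

-- Combos all starting with the same operator o, scanned over e :: rs: equals scanning the
-- tails over rs from the updated accumulator, with o re-attached to a found combo.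
theorem pvScan'_map (goal acc : Int) (o : String) (e : Int) (rs : List Int) (C : List (List String)) :
    pvScan' goal acc (e :: rs) (C.map (fun lo => o :: lo)) =
      (match pvScan' goal (if o = "+" then acc + e else if o = "*" then acc * e else acc) rs C with
       | (b, r) => (b, r.map (fun lo => o :: lo))) := by
  induction C with
  | nil => rfl
  | cons lo rest ih =>
      simp only [List.map_cons, pvScan', pvEvalZip]
      split_ifs <;> simp_all

-- The core equivalence: A's scan of all operator combos equals B's DFS.
theorem pvScan'_eq_dfs (goal : Int) (rs : List Int) (acc : Int) :
    pvScan' goal acc rs (pvProduct rs.length) =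
      (match pvDfs goal rs acc with
       | some r => (true, some r)
       | none => (false, none)) := by
  induction rs generalizing acc with
  | nil =>
      simp only [List.length_nil, pvProduct, pvScan', pvEvalZip, pvDfs]
      split_ifs <;> rfl
  | cons e rest ih =>
      simp only [List.length_cons, pvProduct, pvScan'_append, pvScan'_map, ih,
        pvDfs]
      norm_num
      rcases h1 : pvDfs goal rest (acc * e) with _ | r1 <;>
        rcases h2 : pvDfs goal rest (acc + e) with _ | r2 <;> simp_all

-- ===== VERDICT =====
theorem check_possible_combinations_spec : Claim_equal_check_possible_combinations := by
  intro v _ hpre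
  unfold Spec_check_possible_combinations
  match v, hpre with
  | g :: e :: rs, _ =>
    show pvScan g (e :: rs) (pvProduct ((e :: rs).length - 1)) = _
    simp only [List.length_cons, Nat.add_sub_cancel, pvScan_eq_scan', pvScan'_eq_dfs]
    rfl
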